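-- pv_equiv track=rewrite | github.com/sanidhya12345/PyLogicArena | toggleLightBulbs.py | toggleLightBulbs
-- ===== SOURCE A (Python) =====
-- def toggleLightBulbs(bulbs: list[int]) -> list[int]:
--     d=dict()
--     for i in bulbs:
--         if i not in d:
--             d[i]=True
--         else:
--             if d[i]==True:
--                 d[i]=False
--             else:
--                 d[i]=True
--     l=[i for i in d.keys() if d[i] is True]
--     l.sort()
--     return l
-- ===== SOURCE B (Python) =====
-- def toggleLightBulbs(bulbs: list[int]) -> list[int]:
--     s = sorted(bulbs)
--     res = []
--     i = 0
--     n = len(s)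
--     while i < n:
--         j = i + 1
--         while j < n and s[j] == s[i]:
--             j += 1
--         if (j - i) % 2 == 1:
--             res.append(s[i])
--         i = j
--     return res
-- ===== Notes on version B (the rewrite author's own statement) =====
-- stated objective: alternative
-- what changed: Replaced the parity-dict build plus key-filter plus final sort with a sort-first pass that scans consecutive equal runs of the sorted copy and emits the value of each odd-length run, so no hash map and no final sort are needed.
import Mathlib
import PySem

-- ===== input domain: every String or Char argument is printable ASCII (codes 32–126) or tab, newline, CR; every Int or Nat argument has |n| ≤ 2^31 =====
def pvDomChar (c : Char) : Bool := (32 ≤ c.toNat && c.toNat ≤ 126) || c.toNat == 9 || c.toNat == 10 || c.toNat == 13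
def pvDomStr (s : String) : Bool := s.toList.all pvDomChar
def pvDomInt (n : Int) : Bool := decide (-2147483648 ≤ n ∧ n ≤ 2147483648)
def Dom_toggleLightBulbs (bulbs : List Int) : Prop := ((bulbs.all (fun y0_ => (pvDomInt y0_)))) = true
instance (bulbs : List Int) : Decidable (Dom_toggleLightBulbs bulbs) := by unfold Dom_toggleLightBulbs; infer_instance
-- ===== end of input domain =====

-- B replaces A's parity-dict build + key-filter + final sort by sorting a copy first and
-- sweeping consecutive equal runs, emitting the value of each odd-length run (alternative decomposition).

-- ===== PORT A =====
-- the body of A's toggle loop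
def pvToggleStep (d : PySem.Dict Int Bool) (i : Int) : PySem.Dict Int Bool :=
  if ¬ d.contains i then d.insert i true
  else if d.getD i false = true then d.insert i false else d.insert i true

def toggleLightBulbs (bulbs : List Int) : List Int :=
  let d := bulbs.foldl pvToggleStep PySem.Dict.empty
  let l := d.keys.filter (fun i => d.getD i false == true)
  PySem.List.sorted l (fun x => x) false

-- ===== PORT B =====
-- the outer while loop of B: one recursive sweep over runs of equal values of the sorted copy
def pvRunScan : List Int → List Int
  | [] => []
  | x :: xs =>
    let run := xs.takeWhile (fun y => y == x)
    let rest := xs.dropWhile (fun y => y == x)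
    if (run.length + 1) % 2 = 1 then x :: pvRunScan rest else pvRunScan rest
  termination_by s => s.length
  decreasing_by
    all_goals
      simp only [List.length_cons]
      exact Nat.lt_succ_of_le (List.length_dropWhile_le _ _)

def toggleLightBulbs_alt (bulbs : List Int) : List Int :=
  pvRunScan (PySem.List.sorted bulbs (fun x => x) false)

-- ===== PRECONDITION & SPEC =====
def Spec_toggleLightBulbs (bulbs : List Int) (out : List Int) : Prop := out = toggleLightBulbs_alt bulbs
instance (bulbs : List Int) (out : List Int) : Decidable (Spec_toggleLightBulbs bulbs out) := by unfold Spec_toggleLightBulbs; infer_instance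

-- ===== CLAIM (what is proved, stated in full; the proofs are below) =====
def Claim_equal_toggleLightBulbs : Prop := ∀ (bulbs : List Int), Dom_toggleLightBulbs bulbs → Spec_toggleLightBulbs bulbs (toggleLightBulbs bulbs)

-- ===== LEMMAS AND PROOFS =====

-- A's loop body is a parity toggle at key i
lemma pvToggleStep_eq (d : PySem.Dict Int Bool) (i : Int) :
    pvToggleStep d i = d.insert i (! d.getD i false) := by
  unfold pvToggleStep
  by_cases h : d.contains i
  · simp only [h, not_true, if_false]
    by_cases hv : d.getD i false = true <;> simp [hv]
  · have h' : d.contains i = false := by simpa using h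
    have : d.getD i false = false := PySem.Dict.getD_of_not_contains d false h'
    simp [h, this]

-- the dict built by A's loop stores exactly the parity of each count
lemma pvFold_getD (l : List Int) (d : PySem.Dict Int Bool) (x : Int) :
    (l.foldl pvToggleStep d).getD x false
      = xor (d.getD x false) (decide (l.count x % 2 = 1)) := by
  induction l generalizing d with
  | nil => simp
  | cons a t ih =>
    simp only [List.foldl_cons, ih, pvToggleStep_eq, List.count_cons]
    by_cases hx : a = x
    · subst hx
      simp only [PySem.Dict.getD_insert, if_pos]
      rcases Nat.even_or_odd (t.count a) with he | ho
      · have h2 : t.count a % 2 = 0 := Nat.even_iff.mp he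
        have h2' : (t.count a + 1) % 2 = 1 := by omega
        simp [h2, h2']
      · have h2 : t.count a % 2 = 1 := Nat.odd_iff.mp ho
        have h2' : (t.count a + 1) % 2 = 0 := by omega
        simp [h2, h2']
    · simp [PySem.Dict.getD_insert, Ne.symm hx, hx]

lemma pvFold_keys (bulbs : List Int) :
    (bulbs.foldl pvToggleStep PySem.Dict.empty).keys = PySem.Set.ofList bulbs := by
  have h : bulbs.foldl pvToggleStep PySem.Dict.empty
      = bulbs.foldl (fun d i => d.insert i (! d.getD i false)) PySem.Dict.empty := by
    congr 1; funext d i; exact pvToggleStep_eq d i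
  rw [h, PySem.Dict.keys_foldl_insert]
  rfl

lemma pvFold_keys_nodup (bulbs : List Int) :
    (bulbs.foldl pvToggleStep PySem.Dict.empty).keys.Nodup := by
  rw [pvFold_keys]; exact PySem.Set.nodup_ofList bulbs

lemma pvRun_facts (x : Int) (xs : List Int) (h : (x :: xs).Pairwise (· ≤ ·)) :
    (∀ y ∈ xs.dropWhile (fun y => y == x), x < y)
    ∧ (xs.dropWhile (fun y => y == x)).Pairwise (· ≤ ·) := by
  have hle : ∀ y ∈ xs, x ≤ y := (List.pairwise_cons.mp h).1
  have hpxs : xs.Pairwise (· ≤ ·) := (List.pairwise_cons.mp h).2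
  have hsub : (xs.dropWhile (fun y => y == x)).Sublist xs := List.dropWhile_sublist _
  have hp : (xs.dropWhile (fun y => y == x)).Pairwise (· ≤ ·) := hpxs.sublist hsub
  refine ⟨?_, hp⟩
  intro y hy
  have hyx : x ≤ y := hle y (hsub.mem hy)
  rcases hne : xs.dropWhile (fun y => y == x) with _ | ⟨hd, tl⟩
  · simp [hne] at hy
  · have hhd : ¬ (hd == x) = true := by
      have := List.head_dropWhile_not (fun y => y == x) (l := xs) (by simp [hne])
      simpa [hne] using this
    have hhdx : hd ≠ x := by simpa using hhd
    have hhdle : x ≤ hd := hle hd (hsub.mem (by simp [hne]))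
    have hhdlt : x < hd := lt_of_le_of_ne hhdle (Ne.symm hhdx)
    rw [hne] at hy
    rcases List.mem_cons.mp hy with rfl | hytl
    · exact hhdlt
    · have : hd ≤ y := (List.pairwise_cons.mp (hne ▸ hp)).1 y hytl
      exact lt_of_lt_of_le hhdlt this

lemma pvCount_run (x y : Int) (xs : List Int) (h : (x :: xs).Pairwise (· ≤ ·)) :
    (x :: xs).count y
      = if y = x then (xs.takeWhile (fun y => y == x)).length + 1
        else (xs.dropWhile (fun y => y == x)).count y := by
  have hrest := (pvRun_facts x xs h).1
  have hsplit : xs = xs.takeWhile (fun y => y == x) ++ xs.dropWhile (fun y => y == x) :=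
    (List.takeWhile_append_dropWhile).symm
  have hrun : ∀ z ∈ xs.takeWhile (fun y => y == x), z = x := by
    intro z hz
    have := List.mem_takeWhile_imp hz
    simpa using this
  by_cases hyx : y = x
  · subst hyx
    have h1 : (xs.takeWhile (fun z => z == y)).count y = (xs.takeWhile (fun z => z == y)).length := by
      apply List.count_eq_length.mpr
      intro z hz; exact (hrun z hz).symm
    have h2 : (xs.dropWhile (fun z => z == y)).count y = 0 := by
      apply List.count_eq_zero.mpr
      intro hmem; exact absurd rfl (ne_of_gt (hrest y hmem))
    have hx : xs.count y = (xs.takeWhile (fun z => z == y)).length := by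
      conv_lhs => rw [hsplit]
      rw [List.count_append, h1, h2]
      omega
    rw [List.count_cons_self, hx, if_pos rfl]
  · have h1 : (xs.takeWhile (fun z => z == x)).count y = 0 := by
      apply List.count_eq_zero.mpr
      intro hmem; exact hyx (hrun y hmem)
    have hx : xs.count y = (xs.dropWhile (fun z => z == x)).count y := by
      conv_lhs => rw [hsplit]
      rw [List.count_append, h1, Nat.zero_add]
    rw [if_neg hyx, ← hx]
    simp [Ne.symm hyx]

lemma pvRunScan_mem (s : List Int) (h : s.Pairwise (· ≤ ·)) (y : Int) :
    y ∈ pvRunScan s ↔ s.count y % 2 = 1 := by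
  induction s using pvRunScan.induct with
  | case1 => simp [pvRunScan]
  | case2 x xs run rest hodd ih =>
    have hfacts := pvRun_facts x xs h
    have hcount := pvCount_run x y xs h
    rw [pvRunScan, if_pos hodd, hcount]
    by_cases hyx : y = x
    · simp only [run] at hodd
      simp [hyx, hodd]
    · rw [if_neg hyx]
      simp only [List.mem_cons, hyx, false_or]
      exact ih hfacts.2
  | case3 x xs run rest hodd ih =>
    have hfacts := pvRun_facts x xs h
    have hcount := pvCount_run x y xs h
    rw [pvRunScan, if_neg hodd, ih hfacts.2, hcount]
    by_cases hyx : y = x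
    · simp only [run] at hodd
      have hc0 : (xs.dropWhile (fun z => z == x)).count y = 0 :=
        List.count_eq_zero.mpr (fun hm => absurd hyx (ne_of_gt (hfacts.1 y hm)))
      rw [if_pos hyx, hc0]
      constructor
      · intro hh; omega
      · intro hh; exact absurd hh hodd
    · rw [if_neg hyx]

lemma pvRunScan_sorted (s : List Int) (h : s.Pairwise (· ≤ ·)) :
    (pvRunScan s).Pairwise (· < ·) := by
  induction s using pvRunScan.induct with
  | case1 => simp [pvRunScan]
  | case2 x xs run rest hodd ih =>
    have hfacts := pvRun_facts x xs h
    rw [pvRunScan, if_pos hodd]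
    refine List.pairwise_cons.mpr ⟨?_, ih hfacts.2⟩
    intro y hy
    have hyc : (xs.dropWhile (fun y => y == x)).count y % 2 = 1 :=
      (pvRunScan_mem _ hfacts.2 y).mp hy
    have hymem : y ∈ xs.dropWhile (fun y => y == x) := by
      apply List.count_pos_iff.mp; omega
    exact hfacts.1 y hymem
  | case3 x xs run rest hodd ih =>
    rw [pvRunScan, if_neg hodd]
    exact ih (pvRun_facts x xs h).2

-- ===== VERDICT (by name: the statement is the Claim_ definition above) =====
theorem toggleLightBulbs_spec : Claim_equal_toggleLightBulbs := by
  intro bulbs _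
  unfold Spec_toggleLightBulbs toggleLightBulbs toggleLightBulbs_alt
  set d := bulbs.foldl pvToggleStep PySem.Dict.empty with hd
  set s := PySem.List.sorted bulbs (fun x => x) false with hs
  have hperm : s.Perm bulbs := PySem.List.sorted_perm bulbs (fun x => x) false
  have hsorted : s.Pairwise (· ≤ ·) := by
    simpa using PySem.List.sorted_pairwise bulbs (fun x => x)
  have hnd : d.keys.Nodup := pvFold_keys_nodup bulbs
  have hkeys : d.keys = PySem.Set.ofList bulbs := pvFold_keys bulbs
  have hgetD : ∀ x, d.getD x false = decide (bulbs.count x % 2 = 1) := by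
    intro x
    rw [hd, pvFold_getD]
    simp
  set l := d.keys.filter (fun i => d.getD i false == true) with hl
  have hlnd : l.Nodup := hnd.filter _
  have hlmem : ∀ y, y ∈ l ↔ bulbs.count y % 2 = 1 := by
    intro y
    rw [hl, List.mem_filter, hkeys, PySem.Set.mem_ofList, hgetD]
    constructor
    · rintro ⟨_, h2⟩; simpa using h2
    · intro h
      refine ⟨?_, by simpa using h⟩
      apply List.count_pos_iff.mp; omega
  have hBmem : ∀ y, y ∈ pvRunScan s ↔ bulbs.count y % 2 = 1 := by
    intro y
    rw [pvRunScan_mem s hsorted y, hperm.count_eq]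
  have hBpair : (pvRunScan s).Pairwise (· < ·) := pvRunScan_sorted s hsorted
  have hBnd : (pvRunScan s).Nodup := hBpair.imp ne_of_lt
  have hpermBl : (pvRunScan s).Perm l := by
    rw [List.perm_ext_iff_of_nodup hBnd hlnd]
    intro y; rw [hBmem y, hlmem y]
  exact PySem.List.sorted_eq_of_perm_of_pairwise_lt _ _ _ hpermBl hBpair
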